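-- pv_equiv track=rewrite | github.com/edmine-cpu/edmine-backend-main | middleware/security.py | check_sql_injection
-- ===== SOURCE A (Python) =====
-- def check_sql_injection(input_str: str) -> bool:
--     """Check for potential SQL injection"""
--     if not input_str:
--         return False
--
--     sql_patterns = [
--         "' OR '1'='1",
--         "' OR 1=1",
--         "' UNION SELECT",
--         "'; DROP TABLE",
--         "'; DELETE FROM",
--         "'; INSERT INTO",
--         "'; UPDATE",
--         "' AND 1=1",
--         "1' OR '1'='1",
--     ]
--
--     input_lower = input_str.lower()
--     return any(pattern.lower() in input_lower for pattern in sql_patterns)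
-- ===== SOURCE B (Python) =====
-- def check_sql_injection(input_str: str) -> bool:
--     """Check for potential SQL injection (single left-to-right scan)."""
--     patterns = [
--         "' or '1'='1",
--         "' or 1=1",
--         "' union select",
--         "'; drop table",
--         "'; delete from",
--         "'; insert into",
--         "'; update",
--         "' and 1=1",
--         "1' or '1'='1",
--     ]
--     s = input_str.lower()
--     for i in range(len(s)):
--         if any(s.startswith(p, i) for p in patterns):
--             return True
--     return False
-- ===== Notes on version B (the rewrite author's own statement) =====
-- stated objective: alternative
-- what changed: Replaces nine independent substring searches over the lowercased input by one left-to-right scan that at each position checks whether any (pre-lowercased) pattern starts there.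
import Mathlib
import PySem

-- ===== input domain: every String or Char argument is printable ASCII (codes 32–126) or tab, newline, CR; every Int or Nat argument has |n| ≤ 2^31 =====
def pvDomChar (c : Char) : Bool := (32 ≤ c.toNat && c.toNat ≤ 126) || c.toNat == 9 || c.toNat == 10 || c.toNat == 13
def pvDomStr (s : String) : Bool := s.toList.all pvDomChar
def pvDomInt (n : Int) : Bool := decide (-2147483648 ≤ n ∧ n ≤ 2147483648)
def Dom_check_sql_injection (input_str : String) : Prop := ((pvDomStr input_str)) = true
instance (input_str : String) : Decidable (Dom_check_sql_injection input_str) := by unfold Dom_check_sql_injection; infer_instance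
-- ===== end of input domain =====

-- B replaces A's nine separate substring searches by one left-to-right scan checking each position once (objective: alternative).

-- ===== PORT A =====
def sqlPatterns : List String :=
  ["' OR '1'='1", "' OR 1=1", "' UNION SELECT", "'; DROP TABLE", "'; DELETE FROM",
   "'; INSERT INTO", "'; UPDATE", "' AND 1=1", "1' OR '1'='1"]

def check_sql_injection (input_str : String) : Bool :=
  if PySem.Str.len input_str = 0 then false
  else
    let input_lower := PySem.Str.lower input_str
    sqlPatterns.any (fun pattern => PySem.Str.isIn (PySem.Str.lower pattern) input_lower)

-- ===== PORT B =====
def pvPats : List (List Char) :=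
  ["' or '1'='1".toList, "' or 1=1".toList, "' union select".toList, "'; drop table".toList,
   "'; delete from".toList, "'; insert into".toList, "'; update".toList, "' and 1=1".toList,
   "1' or '1'='1".toList]

-- the 'for i in range(len(s))' loop of Source B, as recursion over the suffixes of s
def pvScan (cs : List Char) : Bool :=
  match cs with
  | [] => false
  | c :: t => if pvPats.any (fun p => PySem.Chars.startswith (c :: t) p) then true else pvScan t

def check_sql_injection_alt (input_str : String) : Bool :=
  pvScan (PySem.Chars.lower input_str.toList)

-- ===== PRECONDITION & SPEC =====
def Spec_check_sql_injection (input_str : String) (out : Bool) : Prop := out = check_sql_injection_alt input_str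
instance (input_str : String) (out : Bool) : Decidable (Spec_check_sql_injection input_str out) := by unfold Spec_check_sql_injection; infer_instance

-- ===== CLAIM (what is proved, stated in full; the proofs are below) =====
def Claim_equal_check_sql_injection : Prop := ∀ (input_str : String), Dom_check_sql_injection input_str → Spec_check_sql_injection input_str (check_sql_injection input_str)

-- ===== LEMMAS AND PROOFS =====

lemma pvScan_iff (cs : List Char) :
    pvScan cs = true ↔ ∃ p ∈ pvPats, p <:+: cs := by
  induction cs with
  | nil =>
      simp [pvScan, List.infix_nil]
      decide
  | cons c t ih =>
      rw [pvScan]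
      split
      · rename_i h
        simp only [List.any_eq_true, PySem.Chars.startswith_iff] at h
        obtain ⟨p, hp, hpre⟩ := h
        simp only [true_iff]
        exact ⟨p, hp, hpre.isInfix⟩
      · rename_i h
        simp only [List.any_eq_true, PySem.Chars.startswith_iff, not_exists, not_and] at h
        rw [ih]
        constructor
        · rintro ⟨p, hp, hinf⟩; exact ⟨p, hp, hinf.trans (List.suffix_cons c t).isInfix⟩
        · rintro ⟨p, hp, hinf⟩
          rw [List.infix_cons_iff] at hinf
          rcases hinf with hpre | hinf
          · exact absurd hpre (h p hp)
          · exact ⟨p, hp, hinf⟩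

-- ===== VERDICT (by name: the statement is the Claim_ definition above) =====
set_option maxHeartbeats 2000000 in
theorem check_sql_injection_spec : Claim_equal_check_sql_injection := by
  intro s _
  unfold Spec_check_sql_injection check_sql_injection check_sql_injection_alt
  by_cases h : s.toList = []
  · simp only [PySem.Str.len_eq, h, List.length_nil, Int.natCast_zero]
    rfl
  · have hlen : ¬ (PySem.Str.len s = 0) := by
      simp [PySem.Str.len_eq]
      intro hc; exact h (by simp [hc])
    rw [if_neg hlen, Bool.eq_iff_iff, pvScan_iff]
    have e1 : PySem.Chars.lower ("' OR '1'='1".toList) = "' or '1'='1".toList := by decide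
    have e2 : PySem.Chars.lower ("' OR 1=1".toList) = "' or 1=1".toList := by decide
    have e3 : PySem.Chars.lower ("' UNION SELECT".toList) = "' union select".toList := by decide
    have e4 : PySem.Chars.lower ("'; DROP TABLE".toList) = "'; drop table".toList := by decide
    have e5 : PySem.Chars.lower ("'; DELETE FROM".toList) = "'; delete from".toList := by decide
    have e6 : PySem.Chars.lower ("'; INSERT INTO".toList) = "'; insert into".toList := by decide
    have e7 : PySem.Chars.lower ("'; UPDATE".toList) = "'; update".toList := by decide
    have e8 : PySem.Chars.lower ("' AND 1=1".toList) = "' and 1=1".toList := by decide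
    have e9 : PySem.Chars.lower ("1' OR '1'='1".toList) = "1' or '1'='1".toList := by decide
    simp only [sqlPatterns, pvPats, List.any_cons, List.any_nil, Bool.or_eq_true,
      PySem.Str.isIn_iff_infix, PySem.Str.toList_lower, e1, e2, e3, e4, e5, e6, e7, e8, e9,
      List.mem_cons, List.not_mem_nil, or_false, exists_eq_or_imp, exists_eq_left,
      Bool.false_eq_true]
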